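-- pv_equiv track=rewrite | github.com/mitas/bitwarden-cleanup | bitwarden_csv_deduplicate.py | select_best_entry
-- ===== SOURCE A (Python) =====
-- from typing import Dict, List, Tuple, Optional
--
-- def select_best_entry(entries: List[Dict[str, str]]) -> Optional[Dict[str, str]]:
--     """Select the best entry from a group of duplicates."""
--     if not entries:
--         return None
--
--     if len(entries) == 1:
--         return entries[0]
--
--     # First prioritize entries with TOTP
--     entries_with_totp = [e for e in entries if e.get("login_totp")]
--
--     # Then prioritize entries with non-empty notes
--     entries_with_notes = [e for e in entries if e.get("notes")]
--
--     # Then prioritize entries with URI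
--     entries_with_uri = [e for e in entries if e.get("login_uri")]
--
--     # Priority a: Entries with both TOTP and notes
--     if entries_with_totp and entries_with_notes:
--         both = [e for e in entries_with_totp if e in entries_with_notes]
--         if both:
--             return both[0]
--
--     # Priority b: Entries with TOTP
--     if entries_with_totp:
--         return entries_with_totp[0]
--
--     # Priority c: Entries with non-empty URI
--     if entries_with_uri:
--         return entries_with_uri[0]
--
--     # Priority d: Entries with notes
--     if entries_with_notes:
--         return entries_with_notes[0]
--
--     # Priority e: Look for entries with longest notes
--     if entries:
--         # Sort by notes length (longest first)
--         sorted_by_notes = sorted(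
--             entries, key=lambda e: len(e.get("notes", "")), reverse=True
--         )
--         if sorted_by_notes[0].get("notes"):
--             return sorted_by_notes[0]
--
--     # Priority f: If all else fails, return the first entry
--     return entries[0]
-- ===== SOURCE B (Python) =====
-- def select_best_entry(entries):
--     """Select the best entry from a group of duplicates (single pass)."""
--     if not entries:
--         return None
--     first_totp_notes = first_totp = first_uri = first_notes = None
--     for e in entries:
--         t = bool(e.get("login_totp"))
--         n = bool(e.get("notes"))
--         u = bool(e.get("login_uri"))
--         if first_totp_notes is None and t and n:
--             first_totp_notes = e
--         if first_totp is None and t: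
--             first_totp = e
--         if first_uri is None and u:
--             first_uri = e
--         if first_notes is None and n:
--             first_notes = e
--     for best in (first_totp_notes, first_totp, first_uri, first_notes):
--         if best is not None:
--             return best
--     return entries[0]
-- ===== Notes on version B (the rewrite author's own statement) =====
-- stated objective: alternative
-- what changed: Replaced the four full filter passes, the membership scan for TOTP+notes entries and the dead sort-by-notes-length step by one linear pass that records the first entry in each priority category.
import Mathlib
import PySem

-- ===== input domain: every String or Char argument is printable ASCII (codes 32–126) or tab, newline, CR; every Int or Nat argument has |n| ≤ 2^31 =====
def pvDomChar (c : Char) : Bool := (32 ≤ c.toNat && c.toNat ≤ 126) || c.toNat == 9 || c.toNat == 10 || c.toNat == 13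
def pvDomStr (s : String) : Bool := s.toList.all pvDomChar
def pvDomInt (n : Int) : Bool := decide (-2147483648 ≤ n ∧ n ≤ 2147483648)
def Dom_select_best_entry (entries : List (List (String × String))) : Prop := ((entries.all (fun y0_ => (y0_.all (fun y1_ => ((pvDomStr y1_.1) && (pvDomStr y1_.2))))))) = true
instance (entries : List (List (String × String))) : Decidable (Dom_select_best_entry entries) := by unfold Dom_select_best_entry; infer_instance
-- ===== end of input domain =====

-- B replaces A's four filter passes, its membership scan for TOTP+notes entries and its dead
-- sort-by-notes-length branch by one linear pass recording the first entry of each priority category.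


-- ===== PORT A =====
-- e.get(k): first match in the association list (dict convention), none if absent
def pvGet? (e : List (String × String)) (k : String) : Option String :=
  (e.find? (fun p => p.1 == k)).map (·.2)

-- truthiness of e.get(k): present and non-empty
def pvTruthy (e : List (String × String)) (k : String) : Bool :=
  match pvGet? e k with
  | some v => v != ""
  | none => false

-- len(e.get("notes", ""))
def pvNotesLen (e : List (String × String)) : Int :=
  PySem.Str.len ((pvGet? e "notes").getD "")

def select_best_entry (entries : List (List (String × String))) : Option (List (String × String)) :=
  if entries.isEmpty then none
  else if entries.length == 1 then entries.head?
  else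
    let entries_with_totp := entries.filter (fun e => pvTruthy e "login_totp")
    let entries_with_notes := entries.filter (fun e => pvTruthy e "notes")
    let entries_with_uri := entries.filter (fun e => pvTruthy e "login_uri")
    -- Priority a: entries with both TOTP and notes ('e in entries_with_notes' = membership scan)
    let both := if !entries_with_totp.isEmpty && !entries_with_notes.isEmpty
                then entries_with_totp.filter (fun e => entries_with_notes.contains e)
                else []
    match both with
    | b :: _ => some b
    | [] =>
      -- Priority b: entries with TOTP
      match entries_with_totp with
      | e :: _ => some e
      | [] =>
        -- Priority c: entries with non-empty URI
        match entries_with_uri with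
        | e :: _ => some e
        | [] =>
          -- Priority d: entries with notes
          match entries_with_notes with
          | e :: _ => some e
          | [] =>
            -- Priority e: sort by notes length, longest first
            match PySem.List.sorted entries pvNotesLen true with
            | s :: _ => if pvTruthy s "notes" then some s else entries.head?
            | [] => entries.head?  -- unreachable: entries nonempty

-- ===== PORT B =====
-- one pass: (first TOTP+notes, first TOTP, first URI, first notes)
def pvStep (st : Option (List (String × String)) × Option (List (String × String)) ×
                 Option (List (String × String)) × Option (List (String × String)))
    (e : List (String × String)) :
    Option (List (String × String)) × Option (List (String × String)) ×
    Option (List (String × String)) × Option (List (String × String)) :=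
  let t := pvTruthy e "login_totp"
  let n := pvTruthy e "notes"
  let u := pvTruthy e "login_uri"
  (if st.1.isNone && (t && n) then some e else st.1,
   if st.2.1.isNone && t then some e else st.2.1,
   if st.2.2.1.isNone && u then some e else st.2.2.1,
   if st.2.2.2.isNone && n then some e else st.2.2.2)

def select_best_entry_alt (entries : List (List (String × String))) : Option (List (String × String)) :=
  match entries with
  | [] => none
  | e0 :: _ =>
    let st := entries.foldl pvStep (none, none, none, none)
    some ((((st.1.or st.2.1).or st.2.2.1).or st.2.2.2).getD e0)

-- ===== PRECONDITION & SPEC =====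
def Spec_select_best_entry (entries : List (List (String × String))) (out : Option (List (String × String))) : Prop := out = select_best_entry_alt entries
instance (entries : List (List (String × String))) (out : Option (List (String × String))) : Decidable (Spec_select_best_entry entries out) := by unfold Spec_select_best_entry; infer_instance

-- ===== CLAIM (what is proved, stated in full; the proofs are below) =====
def Claim_equal_select_best_entry : Prop := ∀ (entries : List (List (String × String))), Dom_select_best_entry entries → Spec_select_best_entry entries (select_best_entry entries)

-- ===== LEMMAS AND PROOFS =====

-- B's fold computes, in each component, the first entry satisfying that component's predicate
theorem pv_foldl_step (l : List (List (String × String)))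
    (st : Option (List (String × String)) × Option (List (String × String)) ×
          Option (List (String × String)) × Option (List (String × String))) :
    l.foldl pvStep st =
      (st.1.or (l.find? (fun e => pvTruthy e "login_totp" && pvTruthy e "notes")),
       st.2.1.or (l.find? (fun e => pvTruthy e "login_totp")),
       st.2.2.1.or (l.find? (fun e => pvTruthy e "login_uri")),
       st.2.2.2.or (l.find? (fun e => pvTruthy e "notes"))) := by
  induction l generalizing st with
  | nil => simp
  | cons e tl ih =>
    obtain ⟨a, b, c, d⟩ := st
    simp only [List.foldl_cons, ih, List.find?_cons]
    unfold pvStep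
    cases a <;> cases b <;> cases c <;> cases d <;>
      cases pvTruthy e "login_totp" <;> cases pvTruthy e "notes" <;>
      cases pvTruthy e "login_uri" <;> simp

-- the 'both' list of A is the filter by the conjunction of the two predicates
theorem pv_both_eq (entries : List (List (String × String))) :
    (if !(entries.filter (fun e => pvTruthy e "login_totp")).isEmpty &&
        !(entries.filter (fun e => pvTruthy e "notes")).isEmpty
     then (entries.filter (fun e => pvTruthy e "login_totp")).filter
            (fun e => (entries.filter (fun e => pvTruthy e "notes")).contains e)
     else []) =
    entries.filter (fun e => pvTruthy e "login_totp" && pvTruthy e "notes") := by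
  split
  next h =>
    rw [List.filter_congr (fun e he => ?_), List.filter_filter]
    · exact List.filter_congr (fun e _ => by rw [Bool.and_comm])
    · have hmem : e ∈ entries := (List.mem_filter.mp he).1
      by_cases hn : pvTruthy e "notes" = true
      · simp [List.mem_filter, hmem, hn]
      · simp only [Bool.not_eq_true] at hn
        simp [List.mem_filter, hn]
  next h =>
    have h' : entries.filter (fun e => pvTruthy e "login_totp") = [] ∨
              entries.filter (fun e => pvTruthy e "notes") = [] := by
      by_contra hc
      rw [not_or] at hc
      exact h (by simp [List.isEmpty_eq_false_iff.mpr hc.1, List.isEmpty_eq_false_iff.mpr hc.2])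
    refine (List.filter_eq_nil_iff.mpr fun e he => ?_).symm
    rcases h' with h' | h'
    · have hf := List.filter_eq_nil_iff.mp h' e he
      simp only [Bool.not_eq_true] at hf
      simp [hf]
    · have hf := List.filter_eq_nil_iff.mp h' e he
      simp only [Bool.not_eq_true] at hf
      simp [hf]
-- ===== VERDICT (by name: the statement is the Claim_ definition above) =====
theorem select_best_entry_spec : Claim_equal_select_best_entry := by
  intro entries _
  show select_best_entry entries = select_best_entry_alt entries
  match entries with
  | [] => rfl
  | [e] =>
    simp only [select_best_entry, select_best_entry_alt, pv_foldl_step, List.find?_cons,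
      List.find?_nil]
    cases pvTruthy e "login_totp" <;> cases pvTruthy e "notes" <;>
      cases pvTruthy e "login_uri" <;> simp
  | e1 :: e2 :: tl =>
    unfold select_best_entry select_best_entry_alt
    rw [pv_foldl_step, if_neg (by simp), if_neg (by simp)]
    dsimp only
    rw [pv_both_eq, ← List.head?_filter, ← List.head?_filter, ← List.head?_filter,
      ← List.head?_filter]
    cases htn : (e1 :: e2 :: tl).filter
        (fun e => pvTruthy e "login_totp" && pvTruthy e "notes") with
    | cons b bt => simp [Option.or]
    | nil =>
    cases ht : (e1 :: e2 :: tl).filter (fun e => pvTruthy e "login_totp") with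
    | cons b bt => simp [Option.or]
    | nil =>
    cases hu : (e1 :: e2 :: tl).filter (fun e => pvTruthy e "login_uri") with
    | cons b bt => simp [Option.or]
    | nil =>
    cases hn : (e1 :: e2 :: tl).filter (fun e => pvTruthy e "notes") with
    | cons b bt => simp [Option.or]
    | nil =>
      -- all notes are empty: the sorted head has falsy notes, so A falls back to entries[0]
      cases hss : PySem.List.sorted (e1 :: e2 :: tl) pvNotesLen true with
      | nil => exact absurd ((PySem.List.sorted_eq_nil_iff _ _ _).mp hss) (by simp)
      | cons s rest =>
        have hmem : s ∈ e1 :: e2 :: tl :=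
          (PySem.List.mem_sorted _ pvNotesLen true s).mp (hss ▸ List.mem_cons_self ..)
        have hfs : pvTruthy s "notes" = false := by
          have := List.filter_eq_nil_iff.mp hn s hmem
          simpa using this
        simp [hfs, Option.or]
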